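-- pv_equiv track=rewrite | github.com/mdaughtrey/personal-projects | projector/scripts/autocroph.py | whitePixels
-- ===== SOURCE A (Python) =====
-- from itertools import groupby
--
-- def whitePixels(data):
--     whites = []
--
--     idx = 0
--     for kk, gg in groupby(data, lambda x: x):
--         count = sum(1 for _ in gg)
--         #if 1 == kk:
--         if 255 == kk:
--             whites.append([idx, count])
--         idx += count
--     return whites
-- ===== SOURCE B (Python) =====
-- def whitePixels(data):
--     whites = []
--     n = len(data)
--     i = 0
--     while i < n:
--         if data[i] == 255:
--             j = i + 1
--             while j < n and data[j] == 255:
--                 j += 1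
--             whites.append([i, j - i])
--             i = j
--         else:
--             i += 1
--     return whites
-- ===== Notes on version B (the rewrite author's own statement) =====
-- stated objective: faster
-- what changed: Replaces the itertools.groupby pass (which groups every run of every value and counts each group element by element) with a direct two-pointer index scan that only materializes runs of 255 and skips other values, removing the per-element generator/grouper overhead.
import Mathlib
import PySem

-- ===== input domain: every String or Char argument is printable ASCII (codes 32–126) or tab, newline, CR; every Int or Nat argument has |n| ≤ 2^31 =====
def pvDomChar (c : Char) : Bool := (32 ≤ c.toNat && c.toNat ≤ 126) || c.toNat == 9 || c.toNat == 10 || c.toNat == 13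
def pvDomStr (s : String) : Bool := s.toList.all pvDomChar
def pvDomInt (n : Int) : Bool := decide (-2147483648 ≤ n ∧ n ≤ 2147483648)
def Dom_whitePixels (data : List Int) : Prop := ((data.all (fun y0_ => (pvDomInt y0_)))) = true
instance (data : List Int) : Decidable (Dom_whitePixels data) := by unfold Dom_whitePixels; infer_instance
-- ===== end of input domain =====

-- B replaces the groupby pass with a direct index scan over runs of 255; same return value, no speed claim.
-- ===== PORT A =====
-- itertools.groupby: adjacent equal values grouped; we record (key, group length) since A only sums the group.
def pyGroupby (l : List Int) : List (Int × Int) :=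
  match l with
  | [] => []
  | x :: rest =>
      (x, 1 + (rest.takeWhile (fun y => y == x)).length) ::
        pyGroupby (rest.dropWhile (fun y => y == x))
termination_by l.length
decreasing_by
  simpa using Nat.lt_succ_of_le (List.length_dropWhile_le _ _)

def whitePixels (data : List Int) : List (List Int) :=
  ((pyGroupby data).foldl
    (fun (st : List (List Int) × Int) kg =>
      (if kg.1 = 255 then st.1 ++ [[st.2, kg.2]] else st.1, st.2 + kg.2))
    ([], 0)).1

-- ===== PORT B =====
-- the outer while loop of Source B: i is the current index; the inner while (run scan) is the takeWhile length
def wpGo (l : List Int) (i : Int) : List (List Int) :=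
  match l with
  | [] => []
  | x :: rest =>
      if x = 255 then
        [i, 1 + (rest.takeWhile (fun y => y == (255 : Int))).length] ::
          wpGo (rest.dropWhile (fun y => y == (255 : Int)))
            (i + (1 + (rest.takeWhile (fun y => y == (255 : Int))).length))
      else
        wpGo rest (i + 1)
termination_by l.length
decreasing_by
  · simpa using Nat.lt_succ_of_le (List.length_dropWhile_le _ _)
  · simp

def whitePixels_alt (data : List Int) : List (List Int) := wpGo data 0

-- ===== PRECONDITION & SPEC =====
def Spec_whitePixels (data : List Int) (out : List (List Int)) : Prop := out = whitePixels_alt data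
instance (data : List Int) (out : List (List Int)) : Decidable (Spec_whitePixels data out) := by unfold Spec_whitePixels; infer_instance

-- ===== CLAIM (what is proved, stated in full; the proofs are below) =====
def Claim_equal_whitePixels : Prop := ∀ (data : List Int), Dom_whitePixels data → Spec_whitePixels data (whitePixels data)

-- ===== LEMMAS AND PROOFS =====
theorem wpGo_skip (t : List Int) (x : Int) (hx : x ≠ 255) (hm : ∀ y ∈ t, y = x) :
    ∀ (rest : List Int) (i : Int), wpGo (t ++ rest) i = wpGo rest (i + t.length) := by
  induction t with
  | nil => intro rest i; simp
  | cons y t ih =>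
      intro rest i
      have hy : y = x := hm y (by simp)
      have hm' : ∀ z ∈ t, z = x := fun z hz => hm z (by simp [hz])
      have : wpGo (y :: (t ++ rest)) i = wpGo (t ++ rest) (i + 1) := by
        rw [wpGo]; simp [hy, hx]
      rw [List.cons_append, this, ih hm' rest (i + 1)]
      congr 1
      simp only [List.length_cons]
      push_cast
      ring

theorem fold_eq (n : Nat) : ∀ (l : List Int), l.length ≤ n → ∀ (acc : List (List Int)) (i : Int),
    ((pyGroupby l).foldl
      (fun (st : List (List Int) × Int) kg =>
        (if kg.1 = 255 then st.1 ++ [[st.2, kg.2]] else st.1, st.2 + kg.2))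
      (acc, i)).1 = acc ++ wpGo l i := by
  induction n with
  | zero =>
      intro l hl acc i
      have : l = [] := List.eq_nil_of_length_eq_zero (Nat.le_zero.mp hl)
      subst this
      simp [pyGroupby, wpGo]
  | succ n ih =>
      intro l hl acc i
      match l with
      | [] => simp [pyGroupby, wpGo]
      | x :: rest =>
          have hsplit : rest.takeWhile (fun y => y == x) ++ rest.dropWhile (fun y => y == x) = rest :=
            List.takeWhile_append_dropWhile
          have hlen : (rest.dropWhile (fun y => y == x)).length ≤ n := by
            have h1 := List.length_dropWhile_le (fun y => y == x) rest
            have h2 : rest.length ≤ n := by simpa using Nat.lt_succ_iff.mp (Nat.lt_of_lt_of_le (by simp) hl)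
            omega
          rw [pyGroupby]
          simp only [List.foldl_cons]
          by_cases hx : x = 255
          · subst hx
            rw [if_pos rfl, ih _ hlen]
            rw [wpGo]
            simp only [List.append_assoc]
            rfl
          · rw [if_neg hx, ih _ hlen]
            have hgo : wpGo (x :: rest) i = wpGo rest (i + 1) := by
              rw [wpGo]; simp [hx]
            have hm : ∀ y ∈ rest.takeWhile (fun y => y == x), y = x := by
              intro y hy
              have := List.mem_takeWhile_imp hy
              exact eq_of_beq this
            have hskip := wpGo_skip (rest.takeWhile (fun y => y == x)) x hx hm
                (rest.dropWhile (fun y => y == x)) (i + 1)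
            rw [hgo]
            conv_rhs => rw [← hsplit]
            rw [hskip]
            congr 2
            omega

-- ===== VERDICT (by name: the statement is the Claim_ definition above) =====
theorem whitePixels_spec : Claim_equal_whitePixels := by
  intro data _
  unfold Spec_whitePixels whitePixels whitePixels_alt
  simpa using fold_eq data.length data (le_refl _) [] 0
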